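-- pv_equiv track=rewrite | github.com/youtube/cobalt | third_party/blink/tools/blinkpy/style/checkers/cpp.py | up_to_unmatched_closing_paren
-- ===== SOURCE A (Python) =====
-- def up_to_unmatched_closing_paren(s):
--     """Splits a string into two parts up to first unmatched ')'.
--
--     Args:
--       s: a string which is a substring of line after '('
--       (e.g., "a == (b + c))").
--
--     Returns:
--       A pair of strings (prefix before first unmatched ')',
--       remainder of s after first unmatched ')'), e.g.,
--       up_to_unmatched_closing_paren("a == (b + c)) { ")
--       returns "a == (b + c)", " {".
--       Returns None, None if there is no unmatched ')'
--     """
--     i = 1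
--     for pos, c in enumerate(s):
--         if c == '(':
--             i += 1
--         elif c == ')':
--             i -= 1
--             if i == 0:
--                 return s[:pos], s[pos + 1:]
--     return None, None
-- ===== SOURCE B (Python) =====
-- def up_to_unmatched_closing_paren(s):
--     # Two-pass decomposition: precompute the running paren depth after each
--     # character (starting from 1), then search that sequence for the first 0.
--     totals = []
--     depth = 1
--     for c in s:
--         depth += (c == '(') - (c == ')')
--         totals.append(depth)
--     for pos, d in enumerate(totals):
--         if d == 0:
--             return s[:pos], s[pos + 1:]
--     return None, None
-- ===== Notes on version B (the rewrite author's own statement) =====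
-- stated objective: alternative
-- what changed: Replaces the single stateful scan with an early return by a two-pass decomposition: first map the string to its running paren-depth sequence (starting at 1), then a separate search for the first position whose depth is 0.
import Mathlib
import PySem

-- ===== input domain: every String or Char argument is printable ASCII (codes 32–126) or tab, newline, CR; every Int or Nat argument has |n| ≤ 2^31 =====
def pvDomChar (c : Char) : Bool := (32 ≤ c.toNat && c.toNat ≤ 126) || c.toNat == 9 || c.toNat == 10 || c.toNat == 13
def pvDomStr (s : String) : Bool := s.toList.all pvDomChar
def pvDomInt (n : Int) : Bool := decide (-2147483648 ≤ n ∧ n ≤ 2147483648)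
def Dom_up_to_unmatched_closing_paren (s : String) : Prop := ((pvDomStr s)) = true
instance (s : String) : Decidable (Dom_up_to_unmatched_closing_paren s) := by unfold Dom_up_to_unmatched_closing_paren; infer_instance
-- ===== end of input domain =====

-- B replaces A's single stateful scan by a two-pass decomposition (precompute
-- running depths, then search for the first 0); same O(n) cost, no speed claim.

-- ===== PORT A =====
-- A's loop: enumerate(s), counter i starts at 1; on ')' with i hitting 0 return
-- (s[:pos], s[pos+1:]); slices have 0 ≤ pos < len s, so they are take/drop exactly.
def pvA_go (s : String) (cs : List Char) (pos : Nat) (i : Int) : Option String × Option String :=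
  match cs with
  | [] => (none, none)
  | c :: rest =>
    if c = '(' then pvA_go s rest (pos + 1) (i + 1)
    else if c = ')' then
      if i - 1 = 0 then
        (some (String.ofList (s.toList.take pos)), some (String.ofList (s.toList.drop (pos + 1))))
      else pvA_go s rest (pos + 1) (i - 1)
    else pvA_go s rest (pos + 1) i

def up_to_unmatched_closing_paren (s : String) : Option String × Option String :=
  pvA_go s s.toList 0 1

-- ===== PORT B =====
-- running depth after each character, starting from `depth`
def pvB_totals (cs : List Char) (depth : Int) : List Int :=
  match cs with
  | [] => []
  | c :: rest =>
    let d := depth + (if c = '(' then 1 else 0) - (if c = ')' then 1 else 0)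
    d :: pvB_totals rest d

-- first index whose entry is 0 (B's enumerate search over `totals`)
def pvB_find (ts : List Int) (pos : Nat) : Option Nat :=
  match ts with
  | [] => none
  | d :: rest => if d = 0 then some pos else pvB_find rest (pos + 1)

def up_to_unmatched_closing_paren_alt (s : String) : Option String × Option String :=
  match pvB_find (pvB_totals s.toList 1) 0 with
  | some pos => (some (String.ofList (s.toList.take pos)), some (String.ofList (s.toList.drop (pos + 1))))
  | none => (none, none)

-- ===== PRECONDITION & SPEC =====
def Spec_up_to_unmatched_closing_paren (s : String) (out : Option String × Option String) : Prop := out = up_to_unmatched_closing_paren_alt s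
instance (s : String) (out : Option String × Option String) : Decidable (Spec_up_to_unmatched_closing_paren s out) := by unfold Spec_up_to_unmatched_closing_paren; infer_instance

-- ===== CLAIM (what is proved, stated in full; the proofs are below) =====
def Claim_equal_up_to_unmatched_closing_paren : Prop := ∀ (s : String), Dom_up_to_unmatched_closing_paren s → Spec_up_to_unmatched_closing_paren s (up_to_unmatched_closing_paren s)

-- ===== LEMMAS AND PROOFS =====
-- Invariant: A's counter stays ≥ 1; under that, A's scan equals B's find-over-totals.
theorem pvAB_go (s : String) (cs : List Char) (pos : Nat) (i : Int) (hi : 1 ≤ i) :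
    pvA_go s cs pos i =
      match pvB_find (pvB_totals cs i) pos with
      | some p => (some (String.ofList (s.toList.take p)), some (String.ofList (s.toList.drop (p + 1))))
      | none => (none, none) := by
  induction cs generalizing pos i with
  | nil => simp [pvA_go, pvB_totals, pvB_find]
  | cons c rest ih =>
    by_cases ho : c = '('
    · have h1 : i + 1 ≠ 0 := by omega
      simp [pvA_go, pvB_totals, pvB_find, ho, h1, ih (pos + 1) (i + 1) (by omega)]
    · by_cases hc : c = ')'
      · by_cases hz : i - 1 = 0
        · simp [pvA_go, pvB_totals, pvB_find, hc, hz]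
        · simp [pvA_go, pvB_totals, pvB_find, hc, hz, ih (pos + 1) (i - 1) (by omega)]
      · have hnz : i ≠ 0 := by omega
        simp [pvA_go, pvB_totals, pvB_find, ho, hc, hnz, ih (pos + 1) i hi]

-- ===== VERDICT (by name: the statement is the Claim_ definition above) =====
theorem up_to_unmatched_closing_paren_spec : Claim_equal_up_to_unmatched_closing_paren := by
  intro s _
  unfold Spec_up_to_unmatched_closing_paren up_to_unmatched_closing_paren up_to_unmatched_closing_paren_alt
  exact pvAB_go s s.toList 0 1 le_rfl
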